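-- pv_equiv track=rewrite | github.com/tech-information-projects/Assignment | Question 1.py | Convert_Currency
-- ===== SOURCE A (Python) =====
-- def Convert_Currency(input_no):
--
--     input_no = input_no[::-1]
--
--     output = ""
--
--     for i in range(len(input_no)):
--         if i > 1 and (i - 3) % 2 == 0:
--             output += ","
--         output = output + input_no[i]
--
--     output = output[::-1]
--
--     return output
-- ===== SOURCE B (Python) =====
-- def Convert_Currency(input_no):
--     if len(input_no) <= 3:
--         return input_no
--     rest, last3 = input_no[:-3], input_no[-3:]
--     groups = []
--     while len(rest) > 2:
--         groups.append(rest[-2:])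
--         rest = rest[:-2]
--     groups.append(rest)
--     groups.reverse()
--     return ",".join(groups) + "," + last3
-- ===== Notes on version B (the rewrite author's own statement) =====
-- stated objective: alternative
-- what changed: Replaces the reversed per-character loop with a modular index test by direct slicing: keep the last 3 chars, split the prefix into 2-char slices from the right, and join them with commas.
import Mathlib
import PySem

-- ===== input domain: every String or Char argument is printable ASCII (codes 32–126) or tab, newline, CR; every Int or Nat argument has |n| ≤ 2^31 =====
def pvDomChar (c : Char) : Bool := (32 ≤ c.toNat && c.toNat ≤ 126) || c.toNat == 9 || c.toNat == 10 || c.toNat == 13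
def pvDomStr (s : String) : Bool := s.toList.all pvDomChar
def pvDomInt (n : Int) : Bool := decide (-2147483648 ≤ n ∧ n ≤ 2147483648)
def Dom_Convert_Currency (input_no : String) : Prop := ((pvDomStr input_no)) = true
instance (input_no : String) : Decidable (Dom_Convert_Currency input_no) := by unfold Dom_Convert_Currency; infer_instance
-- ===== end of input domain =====

-- B replaces A's reversed per-character loop (modular index test) with direct slicing:
-- keep the last 3 chars and split the prefix into 2-char groups from the right — an
-- alternative decomposition of the same Indian-style comma grouping.

-- ===== PORT A =====
def Convert_Currency (input_no : String) : String :=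
  -- input_no = input_no[::-1]  (s[::-1] is reverse: PySem.Str.slice?_none_none_neg_one)
  let rev : List Char := input_no.toList.reverse
  -- for i in range(len(input_no)): if i > 1 and (i-3)%2 == 0: output += ","; output += input_no[i]
  let output : List Char :=
    (PySem.List.pyRange 0 rev.length 1).foldl
      (fun output i =>
        (if 1 < i ∧ PySem.Int.mod (i - 3) 2 = 0 then output ++ [','] else output)
          ++ [PySem.List.pyGetD rev i ' '])
      []
  -- output = output[::-1]
  String.ofList output.reverse

-- ===== PORT B =====
-- while len(rest) > 2: groups.append(rest[-2:]); rest = rest[:-2]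
def bLoop (rest : List Char) (groups : List (List Char)) : List (List Char) × List Char :=
  if 2 < rest.length then
    bLoop (rest.take (rest.length - 2)) (groups ++ [rest.drop (rest.length - 2)])
  else (groups, rest)
termination_by rest.length
decreasing_by simp [List.length_take]; omega

def Convert_Currency_alt (input_no : String) : String :=
  let cs := input_no.toList
  if cs.length ≤ 3 then input_no
  else
    -- rest, last3 = input_no[:-3], input_no[-3:]
    let rest := cs.take (cs.length - 3)
    let last3 := cs.drop (cs.length - 3)
    let p := bLoop rest []
    -- groups.append(rest); groups.reverse(); ",".join(groups) + "," + last3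
    String.ofList ((List.intersperse [','] ((p.1 ++ [p.2]).reverse)).flatten ++ ',' :: last3)

-- ===== PRECONDITION & SPEC =====
def Spec_Convert_Currency (input_no : String) (out : String) : Prop := out = Convert_Currency_alt input_no
instance (input_no : String) (out : String) : Decidable (Spec_Convert_Currency input_no out) := by unfold Spec_Convert_Currency; infer_instance

-- ===== CLAIM (what is proved, stated in full; the proofs are below) =====
def Claim_equal_Convert_Currency : Prop := ∀ (input_no : String), Dom_Convert_Currency input_no → Spec_Convert_Currency input_no (Convert_Currency input_no)

-- ===== LEMMAS AND PROOFS =====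

-- A's comma rule on the reversed string, as structural recursion with absolute index k.
def insA (k : Nat) : List Char → List Char
  | [] => []
  | c :: t => (if 3 ≤ k ∧ k % 2 = 1 then [','] else []) ++ c :: insA (k + 1) t

-- comma before every other char, starting with (b = true) / without (b = false) one
def insP : Bool → List Char → List Char
  | _, [] => []
  | true, c :: t => ',' :: c :: insP false t
  | false, c :: t => c :: insP true t

lemma cond_iff (k : Nat) :
    (1 < (k : Int) ∧ PySem.Int.mod ((k : Int) - 3) 2 = 0) ↔ (3 ≤ k ∧ k % 2 = 1) := by
  rw [PySem.Int.mod, Int.fmod_eq_emod]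
  have h : (if (0:Int) ≤ 2 ∨ (2:Int) ∣ ((k:Int)-3) then (0:Int) else 2) = 0 := by simp
  rw [h]
  omega

lemma foldA (l : List Char) : ∀ (k : Nat) (acc : List Char),
    (List.range l.length).foldl
      (fun (out : List Char) (j : Nat) =>
        (if 1 < ((k : Int) + (j : Int)) ∧ PySem.Int.mod (((k : Int) + (j : Int)) - 3) 2 = 0
          then out ++ [','] else out) ++ [l.getD j ' ']) acc
      = acc ++ insA k l := by
  induction l with
  | nil => intro k acc; simp [insA]
  | cons c t ih =>
    intro k acc
    rw [show (c :: t).length = t.length + 1 from rfl, List.range_succ_eq_map,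
      List.foldl_cons, List.foldl_map]
    have hb : ∀ (out : List Char) (j : Nat), j ∈ List.range t.length →
        ((if 1 < ((k : Int) + ((j + 1 : Nat) : Int)) ∧
              PySem.Int.mod (((k : Int) + ((j + 1 : Nat) : Int)) - 3) 2 = 0
            then out ++ [','] else out) ++ [(c :: t).getD (j + 1) ' '])
          = ((if 1 < (((k + 1 : Nat) : Int) + (j : Int)) ∧
              PySem.Int.mod ((((k + 1 : Nat) : Int) + (j : Int)) - 3) 2 = 0
            then out ++ [','] else out) ++ [t.getD j ' ']) := by
      intro out j _
      have he : ((k : Int) + ((j + 1 : Nat) : Int)) = (((k + 1 : Nat) : Int) + (j : Int)) := by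
        push_cast; ring
      rw [he, List.getD_cons_succ]
    rw [PySem.List.foldl_congr_mem (List.range t.length) _ _ _ hb, ih (k + 1)]
    have hc : (1 < ((k : Int) + ((0 : Nat) : Int)) ∧
        PySem.Int.mod (((k : Int) + ((0 : Nat) : Int)) - 3) 2 = 0) ↔ (3 ≤ k ∧ k % 2 = 1) := by
      simpa using cond_iff k
    simp only [insA, List.getD_cons_zero]
    by_cases h : 3 ≤ k ∧ k % 2 = 1
    · rw [if_pos (hc.mpr h), if_pos h]; simp
    · rw [if_neg (fun hx => h (hc.mp hx)), if_neg h]; simp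

lemma insA_small (l : List Char) (h : l.length ≤ 3) : insA 0 l = l := by
  match l with
  | [] => rfl
  | [a] => rfl
  | [a, b] => rfl
  | [a, b, c] => rfl
  | a :: b :: c :: d :: t => simp at h; omega

lemma insA_high (t : List Char) : ∀ k : Nat, 3 ≤ k → insA k t = insP (decide (k % 2 = 1)) t := by
  induction t with
  | nil => intro k _; rfl
  | cons c t ih =>
    intro k hk
    by_cases h : k % 2 = 1
    · simp only [insA]
      rw [if_pos (show 3 ≤ k ∧ k % 2 = 1 from ⟨hk, h⟩), h,
        ih (k + 1) (by omega),
        show decide ((k + 1) % 2 = 1) = false by rw [decide_eq_false_iff_not]; omega]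
      simp [insP]
    · simp only [insA]
      rw [if_neg (show ¬ (3 ≤ k ∧ k % 2 = 1) from fun hx => h hx.2),
        ih (k + 1) (by omega),
        show decide ((k + 1) % 2 = 1) = true by rw [decide_eq_true_eq]; omega,
        show decide (k % 2 = 1) = false by rw [decide_eq_false_iff_not]; omega]
      simp [insP]

lemma bLoop_acc (n : Nat) : ∀ (rest : List Char), rest.length ≤ n → ∀ (g : List (List Char)),
    bLoop rest g = (g ++ (bLoop rest []).1, (bLoop rest []).2) := by
  induction n with
  | zero =>
    intro rest hl g
    have e : ∀ g' : List (List Char), bLoop rest g' = (g', rest) := by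
      intro g'; rw [bLoop, if_neg (by omega : ¬ 2 < rest.length)]
    rw [e g, e []]; simp
  | succ n ih =>
    intro rest hl g
    by_cases h : 2 < rest.length
    · have hlen : (rest.take (rest.length - 2)).length ≤ n := by
        simp [List.length_take]; omega
      have e : ∀ g' : List (List Char), bLoop rest g'
          = bLoop (rest.take (rest.length - 2)) (g' ++ [rest.drop (rest.length - 2)]) := by
        intro g'; rw [bLoop, if_pos h]
      rw [e g, e [], ih _ hlen (g ++ [rest.drop (rest.length - 2)]),
        ih _ hlen ([] ++ [rest.drop (rest.length - 2)])]
      simp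
    · have e : ∀ g' : List (List Char), bLoop rest g' = (g', rest) := by
        intro g'; rw [bLoop, if_neg h]
      rw [e g, e []]; simp

lemma join_append (L : List (List Char)) (z : List Char) (h : L ≠ []) :
    (List.intersperse [','] (L ++ [z])).flatten
      = (List.intersperse [','] L).flatten ++ ',' :: z := by
  induction L with
  | nil => simp at h
  | cons w L ih =>
    match L with
    | [] => simp [List.intersperse]
    | v :: L' =>
      have step : ∀ (a b : List Char) (t : List (List Char)),
          List.intersperse [','] (a :: b :: t) = a :: [','] :: List.intersperse [','] (b :: t) :=
        fun _ _ _ => rfl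
      have hL : (v :: L') ++ [z] = v :: (L' ++ [z]) := rfl
      rw [List.cons_append, List.cons_append, step, step, List.flatten_cons, List.flatten_cons,
        List.flatten_cons, List.flatten_cons, ← hL, ih (by simp)]
      simp

lemma key (n : Nat) : ∀ (rest : List Char), rest.length = n → rest ≠ [] →
    (insP true rest.reverse).reverse
      = (List.intersperse [','] (((bLoop rest []).1 ++ [(bLoop rest []).2]).reverse)).flatten ++ [','] := by
  induction n using Nat.strong_induction_on with
  | _ n ih =>
    intro rest hn hne
    by_cases hsmall : rest.length ≤ 2
    · have e : bLoop rest [] = ([], rest) := by rw [bLoop, if_neg (by omega)]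
      rw [e]
      rcases rest with _ | ⟨a, _ | ⟨b, _ | ⟨c, t⟩⟩⟩
      · exact absurd rfl hne
      · simp [insP]
      · simp [insP]
      · simp at hsmall
    · have hm : rest.length - 2 < rest.length := by omega
      have hd2 : (rest.drop (rest.length - 2)).length = 2 := by
        simp [List.length_drop]; omega
      obtain ⟨x, y, hxy⟩ : ∃ x y, rest.drop (rest.length - 2) = [x, y] := by
        rcases hdd : rest.drop (rest.length - 2) with _ | ⟨x, _ | ⟨y, _ | _⟩⟩ <;>
          first
            | exact ⟨x, y, rfl⟩
            | simp [hdd] at hd2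
      have hsplit : rest = rest.take (rest.length - 2) ++ [x, y] := by
        conv_lhs => rw [← List.take_append_drop (rest.length - 2) rest]
        rw [hxy]
      have hulen : (rest.take (rest.length - 2)).length = rest.length - 2 := by
        rw [List.length_take]; omega
      have hune : rest.take (rest.length - 2) ≠ [] := by
        intro hc; rw [hc] at hulen; simp at hulen; omega
      have hih := ih (rest.length - 2) (by omega) (rest.take (rest.length - 2)) hulen hune
      -- left side
      have hrev : rest.reverse = y :: x :: (rest.take (rest.length - 2)).reverse := by
        conv_lhs => rw [hsplit]
        simp
      have hlhs : (insP true rest.reverse).reverse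
          = (insP true (rest.take (rest.length - 2)).reverse).reverse ++ [x, y, ','] := by
        rw [hrev]
        simp [insP]
      -- right side
      have hb1 : bLoop rest [] = bLoop (rest.take (rest.length - 2)) [[x, y]] := by
        rw [bLoop, if_pos (by omega), hxy, List.nil_append]
      have hb2 : bLoop (rest.take (rest.length - 2)) [[x, y]]
          = ([[x, y]] ++ (bLoop (rest.take (rest.length - 2)) []).1,
             (bLoop (rest.take (rest.length - 2)) []).2) :=
        bLoop_acc (rest.take (rest.length - 2)).length (rest.take (rest.length - 2)) le_rfl [[x, y]]
      set u := rest.take (rest.length - 2) with hu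
      have hLne : ((bLoop u []).1 ++ [(bLoop u []).2]).reverse ≠ [] := by simp
      have hrearr : ((bLoop rest []).1 ++ [(bLoop rest []).2]).reverse
          = ((bLoop u []).1 ++ [(bLoop u []).2]).reverse ++ [[x, y]] := by
        rw [hb1, hb2]; simp
      rw [hlhs, hih, hrearr, join_append _ _ hLne]
      simp

-- ===== VERDICT (by name: the statement is the Claim_ definition above) =====
theorem Convert_Currency_spec : Claim_equal_Convert_Currency := by
  intro s _
  simp only [Spec_Convert_Currency, Convert_Currency, Convert_Currency_alt]
  have hfold := foldA s.toList.reverse 0 []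
  simp only [Nat.cast_zero, zero_add] at hfold
  rw [PySem.List.pyRange_one]
  simp only [sub_zero, Int.toNat_natCast, List.foldl_map, zero_add,
    PySem.List.pyGetD_natCast]
  rw [hfold]
  simp only [List.nil_append]
  by_cases h : s.toList.length ≤ 3
  · rw [if_pos h, insA_small _ (by simpa using h)]
    simp
  · rw [if_neg h]
    have hlast : (s.toList.drop (s.toList.length - 3)).length = 3 := by
      rw [List.length_drop]; omega
    obtain ⟨c1, c2, c3, hl3⟩ : ∃ c1 c2 c3, s.toList.drop (s.toList.length - 3) = [c1, c2, c3] := by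
      rcases hdd : s.toList.drop (s.toList.length - 3) with _ | ⟨a, _ | ⟨b, _ | ⟨c, _ | _⟩⟩⟩ <;>
        first
          | exact ⟨a, b, c, rfl⟩
          | (rw [hdd] at hlast; simp at hlast)
    have hsplit : s.toList = s.toList.take (s.toList.length - 3) ++ [c1, c2, c3] := by
      conv_lhs => rw [← List.take_append_drop (s.toList.length - 3) s.toList]
      rw [hl3]
    have hrev : s.toList.reverse
        = c3 :: c2 :: c1 :: (s.toList.take (s.toList.length - 3)).reverse := by
      conv_lhs => rw [hsplit]
      simp
    have hins : insA 0 s.toList.reverse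
        = c3 :: c2 :: c1 :: insP true (s.toList.take (s.toList.length - 3)).reverse := by
      rw [hrev]
      simp only [insA, if_neg (by omega : ¬ (3 ≤ 0 ∧ 0 % 2 = 1)),
        if_neg (by omega : ¬ (3 ≤ 2 ∧ 2 % 2 = 1))]
      rw [insA_high _ 3 le_rfl]
      simp
    have hune : s.toList.take (s.toList.length - 3) ≠ [] := by
      have : (s.toList.take (s.toList.length - 3)).length = s.toList.length - 3 := by
        rw [List.length_take]; omega
      intro hc; rw [hc] at this; rw [List.length_nil] at this; omega
    have hkey := key (s.toList.take (s.toList.length - 3)).length _ rfl hune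
    rw [hins]
    simp only [List.reverse_cons, List.append_assoc]
    rw [hkey, hl3]
    simp
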